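-- pv_equiv track=rewrite | github.com/Aasthaengg/IBMdataset | Python_codes/p02722/s625006468.py | yakusu
-- ===== SOURCE A (Python) =====
-- import math
--
-- def yakusu(A):
--   arr = []
--   limit = int(math.sqrt(A))
--   for i in range(2,limit+1):
--     if A % i == 0:
--       arr.append(i)
--       if i != A // i:
--         arr.append(A//i)
--   arr.append(A)
--   arr.sort()
--   return(arr)
-- ===== SOURCE B (Python) =====
-- def yakusu(A):
--     # Build the divisor set recursively from the prime factorization:
--     # divisors(n) = divisors(n // p) union p * divisors(n // p),
--     # where p is the smallest prime factor of n.
--     def divisors(n):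
--         if n == 1:
--             return {1}
--         p = 2
--         while p * p <= n and n % p:
--             p += 1
--         if p * p > n:
--             p = n  # n is prime
--         ds = divisors(n // p)
--         return ds | {p * d for d in ds}
--     return sorted(d for d in divisors(A) if d > 1)
-- ===== Notes on version B (the rewrite author's own statement) =====
-- stated objective: alternative
-- what changed: B abandons A's sqrt-bounded divisor-pair scan entirely: it factorizes A by recursively splitting off the smallest prime factor and builds the divisor set as divisors(n) = divisors(n//p) union p*divisors(n//p), then sorts the divisors greater than 1; no cofactor pairing and no scan of all candidates up to sqrt(A).
-- intended difference: For A = 1, A returns [1] although 1 is not a divisor greater than one; B returns the intended []. — e.g. on yakusu(1): A returns [1], B returns []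
-- outside the precondition, e.g. on yakusu(0): A returns [0], B raises ZeroDivisionError
import Mathlib
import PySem

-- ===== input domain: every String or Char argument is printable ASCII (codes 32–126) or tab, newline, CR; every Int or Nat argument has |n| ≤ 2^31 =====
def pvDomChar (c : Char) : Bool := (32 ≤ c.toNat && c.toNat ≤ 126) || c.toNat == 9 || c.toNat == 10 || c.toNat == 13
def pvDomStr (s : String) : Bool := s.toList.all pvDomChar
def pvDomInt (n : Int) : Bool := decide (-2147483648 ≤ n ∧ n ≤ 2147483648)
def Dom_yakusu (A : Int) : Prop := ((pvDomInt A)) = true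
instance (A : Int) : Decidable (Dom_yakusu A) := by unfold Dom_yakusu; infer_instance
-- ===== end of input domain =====

-- B builds the divisor set recursively from the prime factorization (smallest-prime-factor recursion) instead of A's sqrt-bounded divisor-pair scan; equal to A on A ≥ 2, with a stated intended difference at A = 1.


-- ===== PORT A =====
-- int(math.sqrt(A)) is ported as Int.sqrt A: exact on the admitted inputs 0 ≤ A ≤ 2^31
-- (a correctly rounded double sqrt agrees with the integer square root there).
def yakusu (A : Int) : List Int :=
  let limit : Int := Int.sqrt A
  let arr : List Int :=
    (PySem.List.pyRange 2 (limit + 1) 1).foldl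
      (fun arr i =>
        if PySem.Int.mod A i == 0 then
          arr ++ (i :: (if i ≠ PySem.Int.floordiv A i then [PySem.Int.floordiv A i] else []))
        else arr) []
  PySem.List.sorted (arr ++ [A]) (fun x => x) false

-- ===== PORT B =====
-- Source B inner while loop: p += 1 while p * p <= n and n % p
def smallestFactorLoop (n p : Int) : Int :=
  if h : p * p ≤ n ∧ ¬(PySem.Int.mod n p == 0) then smallestFactorLoop n (p + 1) else p
termination_by (n + 1 - p).toNat
decreasing_by
  have h1 : 2 * p ≤ p * p + 1 := by nlinarith [mul_self_nonneg (p - 1)]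
  have h2 : 0 ≤ p * p := mul_self_nonneg p
  have h3 : p * p ≤ n := h.1
  omega

-- Source B: p = 2; while p * p <= n and n % p: p += 1; if p * p > n: p = n
def smallestFactor (n : Int) : Int :=
  let p := smallestFactorLoop n 2
  if n < p * p then n else p

-- Source B 'divisors(n)' (Python set → PySem.Set); the fuel argument only makes the
-- recursion total in Lean (it is chosen large enough and never runs out on 1 ≤ n)
def divisorsRec (fuel : Nat) (n : Int) : List Int :=
  match fuel with
  | 0 => []
  | fuel + 1 =>
    if n = 1 then [1]
    else
      let p := smallestFactor n
      let ds := divisorsRec fuel (PySem.Int.floordiv n p)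
      PySem.Set.union ds (PySem.Set.ofList (ds.map (fun d => p * d)))

-- Source B: sorted(d for d in divisors(A) if d > 1)
def yakusu_alt (A : Int) : List Int :=
  PySem.List.sorted ((divisorsRec (A.toNat + 1) A).filter (fun d => decide (1 < d))) (fun x => x) false

-- ===== PRECONDITION & SPEC =====
-- Pre_ excludes the negative inputs, on which A raises ValueError (math.sqrt of a negative
-- number), and A = 0, where 'the divisors of 0' is ill-defined: A returns the artefact [0]
-- there while B's factorization naturally raises ZeroDivisionError.
def Pre_yakusu (A : Int) : Prop := 1 ≤ A
instance (A : Int) : Decidable (Pre_yakusu A) := by unfold Pre_yakusu; infer_instance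
def pvWitness_yakusu : Int := 12
-- For A = 1, A returns [1] although 1 is not a divisor greater than one; B returns the intended [].
def D_yakusu (A : Int) : Prop := A = 1
instance (A : Int) : Decidable (D_yakusu A) := by unfold D_yakusu; infer_instance
def Spec_yakusu (A : Int) (out : List Int) : Prop := ¬ D_yakusu A → out = yakusu_alt A
instance (A : Int) (out : List Int) : Decidable (Spec_yakusu A out) := by unfold Spec_yakusu; infer_instance
def pvDiffWitness_yakusu : Int := 1
def pvDiffWitnessOut_yakusu : (List Int) × (List Int) := ([1], [])

-- ===== CLAIM (what is proved, stated in full; the proofs are below) =====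
def Claim_unchanged_yakusu : Prop := ∀ (A : Int), Dom_yakusu A → Pre_yakusu A → Spec_yakusu A (yakusu A)
def Claim_changed_yakusu : Prop := Dom_yakusu (pvDiffWitness_yakusu) ∧ Pre_yakusu (pvDiffWitness_yakusu) ∧ D_yakusu (pvDiffWitness_yakusu) ∧ yakusu (pvDiffWitness_yakusu) = pvDiffWitnessOut_yakusu.1 ∧ yakusu_alt (pvDiffWitness_yakusu) = pvDiffWitnessOut_yakusu.2 ∧ pvDiffWitnessOut_yakusu.1 ≠ pvDiffWitnessOut_yakusu.2
def Claim_exact_yakusu : Prop := ∀ (A : Int), Dom_yakusu A → Pre_yakusu A → D_yakusu A → yakusu A ≠ yakusu_alt A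

-- ===== LEMMAS AND PROOFS =====

-- spec lists: the small divisors of A inside a range list, and their cofactors
def smallsL (A : Int) (l : List Int) : List Int :=
  l.filter (fun i => PySem.Int.mod A i == 0)

def largesL (A : Int) (l : List Int) : List Int :=
  ((smallsL A l).filter (fun i => i ≠ PySem.Int.floordiv A i)).map (fun i => PySem.Int.floordiv A i)

theorem sq_le_iff_le_sqrt (A i : Int) (hA : 0 ≤ A) (hi : 0 ≤ i) :
    i * i ≤ A ↔ i ≤ Int.sqrt A := by
  have hi' : (i.toNat : Int) = i := Int.toNat_of_nonneg hi
  have hA' : (A.toNat : Int) = A := Int.toNat_of_nonneg hA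
  rw [Int.sqrt]
  constructor
  · intro h
    have h2 : i.toNat * i.toNat ≤ A.toNat := by
      have : (↑(i.toNat * i.toNat) : Int) ≤ (A.toNat : Int) := by push_cast; rw [hi', hA']; exact h
      exact_mod_cast this
    have := Nat.le_sqrt.mpr h2
    omega
  · intro h
    have h1 : i.toNat ≤ Nat.sqrt A.toNat := by omega
    have h2 : i.toNat * i.toNat ≤ A.toNat := Nat.le_sqrt.mp h1
    have h3 : (↑(i.toNat * i.toNat) : Int) ≤ (A.toNat : Int) := by exact_mod_cast h2
    push_cast at h3; rw [hi', hA'] at h3; exact h3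

theorem smallsL_cons (A x : Int) (l : List Int) :
    smallsL A (x :: l) = (if PySem.Int.mod A x == 0 then [x] else []) ++ smallsL A l := by
  unfold smallsL; rw [List.filter_cons]; split <;> simp_all

-- A's accumulated list is the flatMap over the range
theorem a_arr_eq (A : Int) :
    (PySem.List.pyRange 2 (Int.sqrt A + 1) 1).foldl
      (fun arr i =>
        if PySem.Int.mod A i == 0 then
          arr ++ (i :: (if i ≠ PySem.Int.floordiv A i then [PySem.Int.floordiv A i] else []))
        else arr) [] =
    (PySem.List.pyRange 2 (Int.sqrt A + 1) 1).flatMap (fun i =>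
        if PySem.Int.mod A i == 0 then
          i :: (if i ≠ PySem.Int.floordiv A i then [PySem.Int.floordiv A i] else [])
        else []) := by
  rw [PySem.List.foldl_congr_mem (g := fun arr i =>
    arr ++ (if PySem.Int.mod A i == 0 then
      i :: (if i ≠ PySem.Int.floordiv A i then [PySem.Int.floordiv A i] else []) else []))]
  · rw [PySem.List.foldl_append_eq_flatMap]
    simp
  · intro acc x _
    by_cases hc : (PySem.Int.mod A x == 0) = true <;> simp [hc]

theorem largesL_cons (A x : Int) (l : List Int) :
    largesL A (x :: l) =
      (if (PySem.Int.mod A x == 0) ∧ x ≠ PySem.Int.floordiv A x then [PySem.Int.floordiv A x] else []) ++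
        largesL A l := by
  unfold largesL
  rw [smallsL_cons]
  by_cases hc : (PySem.Int.mod A x == 0) = true
  · by_cases hd : x ≠ PySem.Int.floordiv A x
    · rw [if_pos hc, if_pos ⟨hc, hd⟩]
      simp [hd]
    · rw [if_pos hc, if_neg (by tauto)]
      simp [hd]
  · rw [if_neg hc, if_neg (by tauto)]
    simp

theorem perm_shuffle (sx lx F S L : List Int) (hp : F.Perm (S ++ L)) :
    ((sx ++ lx) ++ F).Perm ((sx ++ S) ++ (lx ++ L)) := by
  refine (List.Perm.append_left (sx ++ lx) hp).trans ?_
  simp only [List.append_assoc]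
  refine List.Perm.append_left sx ?_
  rw [← List.append_assoc, ← List.append_assoc]
  exact List.Perm.append_right L List.perm_append_comm

-- A side: the flatMap form of A's accumulation is a permutation of smallsL ++ largesL
theorem flatMap_perm (A : Int) (l : List Int) :
    (l.flatMap (fun i =>
        if PySem.Int.mod A i == 0 then
          i :: (if i ≠ PySem.Int.floordiv A i then [PySem.Int.floordiv A i] else [])
        else [])).Perm (smallsL A l ++ largesL A l) := by
  induction l with
  | nil => simp [smallsL, largesL]
  | cons x l ih =>
    rw [List.flatMap_cons, smallsL_cons, largesL_cons]
    have hg : (if PySem.Int.mod A x == 0 then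
          x :: (if x ≠ PySem.Int.floordiv A x then [PySem.Int.floordiv A x] else [])
        else []) =
        (if PySem.Int.mod A x == 0 then [x] else []) ++
          (if (PySem.Int.mod A x == 0) ∧ x ≠ PySem.Int.floordiv A x then [PySem.Int.floordiv A x] else []) := by
      by_cases hc : (PySem.Int.mod A x == 0) = true
      · by_cases hd : x ≠ PySem.Int.floordiv A x <;> simp [hc, hd]
      · simp [hc]
    rw [hg, List.append_assoc, ← List.append_assoc]
    exact perm_shuffle _ _ _ _ _ ih

theorem smallsL_mem_facts (A x : Int) (hA : 0 ≤ A)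
    (hx : x ∈ smallsL A (PySem.List.pyRange 2 (Int.sqrt A + 1) 1)) :
    2 ≤ x ∧ x * x ≤ A ∧ PySem.Int.floordiv A x * x = A := by
  unfold smallsL at hx
  rw [List.mem_filter, PySem.List.mem_pyRange_one] at hx
  obtain ⟨⟨h2, hlt⟩, hm⟩ := hx
  have hm' : PySem.Int.mod A x = 0 := by simpa using hm
  have hsq : x * x ≤ A := (sq_le_iff_le_sqrt A x hA (by omega)).mpr (by omega)
  have hd : x ∣ A := (PySem.Int.mod_eq_zero_iff_dvd A x).mp hm'
  refine ⟨h2, hsq, ?_⟩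
  rw [PySem.Int.floordiv_eq_ediv_of_pos (by omega)]
  exact Int.ediv_mul_cancel hd

theorem small_ne_facts (A x : Int) (hA : 0 ≤ A)
    (hx : x ∈ (smallsL A (PySem.List.pyRange 2 (Int.sqrt A + 1) 1)).filter
      (fun i => i ≠ PySem.Int.floordiv A i)) :
    2 ≤ x ∧ x * x < A ∧ PySem.Int.floordiv A x * x = A := by
  rw [List.mem_filter] at hx
  obtain ⟨hxS, hne⟩ := hx
  have hne' : x ≠ PySem.Int.floordiv A x := by simpa using hne
  obtain ⟨h2, hsq, heq⟩ := smallsL_mem_facts A x hA hxS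
  refine ⟨h2, ?_, heq⟩
  rcases lt_or_eq_of_le hsq with h | h
  · exact h
  · exact absurd (mul_right_cancel₀ (show x ≠ 0 by omega)
      (show x * x = PySem.Int.floordiv A x * x by rw [heq, h])) hne'

theorem largesL_mem_facts (A t : Int) (hA : 0 ≤ A)
    (ht : t ∈ largesL A (PySem.List.pyRange 2 (Int.sqrt A + 1) 1)) :
    ∃ j, 2 ≤ j ∧ j * j < A ∧ t * j = A := by
  unfold largesL at ht
  rw [List.mem_map] at ht
  obtain ⟨j, hjf, rfl⟩ := ht
  obtain ⟨h2, hlt, heq⟩ := small_ne_facts A j hA hjf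
  exact ⟨j, h2, hlt, heq⟩

-- the multiset A accumulates, listed sorted: strictly increasing
theorem a_pairwise (A : Int) (hA : 0 ≤ A) :
    (smallsL A (PySem.List.pyRange 2 (Int.sqrt A + 1) 1) ++
      ((largesL A (PySem.List.pyRange 2 (Int.sqrt A + 1) 1)).reverse ++ [A])).Pairwise (· < ·) := by
  rw [List.pairwise_append]
  refine ⟨(PySem.List.pairwise_lt_pyRange_one 2 (Int.sqrt A + 1)).filter _, ?_, ?_⟩
  · rw [List.pairwise_append]
    refine ⟨?_, by simp, ?_⟩
    · rw [List.pairwise_reverse]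
      unfold largesL
      rw [List.pairwise_map]
      refine List.Pairwise.imp_of_mem ?_
        (((PySem.List.pairwise_lt_pyRange_one 2 (Int.sqrt A + 1)).filter _).filter _)
      intro a b ha hb hab
      obtain ⟨ha2, haa, hea⟩ := small_ne_facts A a hA ha
      obtain ⟨hb2, hbb, heb⟩ := small_ne_facts A b hA hb
      have hfa : 0 < PySem.Int.floordiv A a := by nlinarith
      by_contra hcon
      push_neg at hcon
      nlinarith [mul_le_mul_of_nonneg_right hcon (show (0:ℤ) ≤ b by omega),
        mul_lt_mul_of_pos_left hab hfa]
    · intro t ht b hb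
      rw [List.mem_reverse] at ht
      obtain ⟨j, h2, hlt, heq⟩ := largesL_mem_facts A t hA ht
      have htA : t < A := by nlinarith
      rw [List.mem_singleton.mp hb]
      exact htA
  · intro s hs t ht
    obtain ⟨hs2, hss, _⟩ := smallsL_mem_facts A s hA hs
    rw [List.mem_append, List.mem_reverse] at ht
    rcases ht with ht | ht
    · obtain ⟨j, hj2, hjj, heq⟩ := largesL_mem_facts A t hA ht
      by_contra hcon
      push_neg at hcon
      nlinarith [sq_nonneg (s - j), mul_le_mul_of_nonneg_right hcon (show (0:ℤ) ≤ j by omega)]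
    · rw [List.mem_singleton.mp ht]
      nlinarith


-- ===== B-side lemmas =====

theorem sfl_inv (n p : Int) :
    p ≤ smallestFactorLoop n p ∧
      (∀ q, p ≤ q → q < smallestFactorLoop n p → ¬ q ∣ n) ∧
      (smallestFactorLoop n p * smallestFactorLoop n p ≤ n → smallestFactorLoop n p ∣ n) := by
  induction p using smallestFactorLoop.induct n with
  | case1 p h ih =>
    rw [smallestFactorLoop, dif_pos h]
    obtain ⟨ih1, ih2, ih3⟩ := ih
    refine ⟨by omega, ?_, ih3⟩
    intro q hq1 hq2
    rcases eq_or_lt_of_le hq1 with rfl | hlt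
    · intro hdvd
      exact h.2 (by simp [(PySem.Int.mod_eq_zero_iff_dvd n p).mpr hdvd])
    · exact ih2 q (by omega) hq2
  | case2 p h =>
    rw [smallestFactorLoop, dif_neg h]
    refine ⟨le_refl p, by intro q h1 h2; omega, ?_⟩
    intro hsq
    by_cases hm : (PySem.Int.mod n p == 0) = true
    · exact (PySem.Int.mod_eq_zero_iff_dvd n p).mp (by simpa using hm)
    · exact absurd ⟨hsq, by simpa using hm⟩ h

-- smallestFactor n is the least divisor ≥ 2 of n (for n ≥ 2)
theorem least_div (n : Int) (hn : 2 ≤ n) :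
    smallestFactor n ∣ n ∧ 2 ≤ smallestFactor n ∧
      ∀ q, 2 ≤ q → q ∣ n → smallestFactor n ≤ q := by
  obtain ⟨h1, h2, h3⟩ := sfl_inv n 2
  unfold smallestFactor
  by_cases hr : n < smallestFactorLoop n 2 * smallestFactorLoop n 2
  · rw [if_pos hr]
    refine ⟨dvd_refl n, hn, ?_⟩
    intro q hq2 hqd
    by_contra hcon
    push_neg at hcon
    have hq0 : 0 < q := by omega
    have hqd2 := hqd
    obtain ⟨m, hm⟩ := hqd2
    have hqn : q ≤ n := Int.le_of_dvd (by omega) hqd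
    have hm2 : 2 ≤ m := by nlinarith
    have hmd : m ∣ n := ⟨q, by linarith [hm, mul_comm q m]⟩
    rcases le_total q m with hle | hle
    · have hqq : q * q ≤ n := by nlinarith
      exact h2 q hq2 (by nlinarith) hqd
    · have hqq : m * m ≤ n := by nlinarith
      exact h2 m hm2 (by nlinarith) hmd
  · rw [if_neg hr]
    push_neg at hr
    refine ⟨h3 hr, h1, ?_⟩
    intro q hq2 hqd
    by_contra hcon
    push_neg at hcon
    exact h2 q hq2 hcon hqd

-- the least divisor p of n is prime; a divisor of n not divisible by p divides n / p
theorem key_coprime (n p m x : Int) (hn : 2 ≤ n) (hp2 : 2 ≤ p)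
    (hmin : ∀ q, 2 ≤ q → q ∣ n → p ≤ q) (hnm : n = p * m)
    (hx1 : 1 ≤ x) (hxn : x ∣ n) (hnp : ¬ p ∣ x) : x ∣ m := by
  have hm1 : 1 ≤ m := by nlinarith
  have hPp : Nat.Prime p.toNat := by
    rw [Nat.prime_def]
    refine ⟨by omega, ?_⟩
    intro k hk
    have hk0 : 0 < k := Nat.pos_of_dvd_of_pos hk (by omega)
    by_cases hk1 : k = 1
    · exact Or.inl hk1
    · right
      have hkp : (k : Int) ∣ p := by
        have := Int.natCast_dvd_natCast.mpr hk
        rwa [Int.toNat_of_nonneg (by omega : (0:Int) ≤ p)] at this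
      have hkn : (k : Int) ∣ n := hkp.trans ⟨m, hnm⟩
      have hle : p ≤ (k : Int) := hmin k (by omega) hkn
      have hge : (k : Int) ≤ p := Int.le_of_dvd (by omega) hkp
      omega
  have hco : Nat.Coprime x.toNat p.toNat := by
    refine Nat.Coprime.symm ((Nat.Prime.coprime_iff_not_dvd hPp).mpr ?_)
    intro hdvd
    apply hnp
    have := Int.natCast_dvd_natCast.mpr hdvd
    rwa [Int.toNat_of_nonneg (by omega : (0:Int) ≤ p),
      Int.toNat_of_nonneg (by omega : (0:Int) ≤ x)] at this
  have hxnN : x.toNat ∣ m.toNat * p.toNat := by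
    have hxn' : x ∣ m * p := by rw [mul_comm]; rwa [hnm] at hxn
    have : x.toNat ∣ (m * p).toNat := by
      have h0 : (0:Int) ≤ m * p := by positivity
      exact Int.natCast_dvd_natCast.mp (by
        rw [Int.toNat_of_nonneg (by omega : (0:Int) ≤ x), Int.toNat_of_nonneg h0]
        exact hxn')
    rwa [Int.toNat_mul (by omega) (by omega)] at this
  have hxm : x.toNat ∣ m.toNat := Nat.Coprime.dvd_of_dvd_mul_right hco hxnN
  have := Int.natCast_dvd_natCast.mpr hxm
  rwa [Int.toNat_of_nonneg (by omega : (0:Int) ≤ x),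
    Int.toNat_of_nonneg (by omega : (0:Int) ≤ m)] at this

-- divisorsRec fuel n lists exactly the positive divisors of n (fuel ≥ n)
theorem divisorsRec_mem (fuel : Nat) : ∀ n : Int, 1 ≤ n → n.toNat ≤ fuel →
    ∀ x, x ∈ divisorsRec fuel n ↔ (1 ≤ x ∧ x ∣ n) := by
  induction fuel with
  | zero => intro n h1 h2 x; exfalso; omega
  | succ fuel ih =>
    intro n h1 hf x
    by_cases hone : n = 1
    · subst hone
      have hred : divisorsRec (fuel + 1) (1:Int) = [1] := by simp [divisorsRec]
      rw [hred, List.mem_singleton]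
      constructor
      · rintro rfl; exact ⟨le_refl 1, dvd_refl 1⟩
      · rintro ⟨hx1, hxd⟩
        have := Int.le_of_dvd (by omega) hxd
        omega
    · have hn2 : 2 ≤ n := by omega
      obtain ⟨hpd, hp2, hmin⟩ := least_div n hn2
      obtain ⟨m, hm⟩ := hpd
      have hp0 : (0:Int) < smallestFactor n := by omega
      have key : ∀ p m' : Int, 0 < p → n = p * m' → PySem.Int.floordiv n p = m' := by
        intro p m' hpp hnm
        rw [PySem.Int.floordiv_eq_ediv_of_pos hpp, hnm,
          Int.mul_ediv_cancel_left m' (by omega)]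
      have hfd : PySem.Int.floordiv n (smallestFactor n) = m := key _ m hp0 hm
      have hm1 : 1 ≤ m := by nlinarith
      have h2m : 2 * m ≤ n := by nlinarith
      simp only [divisorsRec, if_neg hone, hfd,
        PySem.Set.mem_union, PySem.Set.mem_ofList, List.mem_map]
      have IH := ih m hm1 (by omega)
      constructor
      · rintro (hx | ⟨d, hd, rfl⟩)
        · obtain ⟨hx1, hxm⟩ := (IH x).mp hx
          have hx2 : x ∣ smallestFactor n * m := hxm.mul_left _
          rw [← hm] at hx2
          exact ⟨hx1, hx2⟩
        · obtain ⟨hd1, hdm⟩ := (IH d).mp hd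
          refine ⟨by nlinarith, ?_⟩
          have hx2 : smallestFactor n * d ∣ smallestFactor n * m := mul_dvd_mul_left _ hdm
          rwa [← hm] at hx2
      · rintro ⟨hx1, hxn⟩
        by_cases hpx : smallestFactor n ∣ x
        · right
          obtain ⟨e, he⟩ := hpx
          have he1 : 1 ≤ e := by nlinarith
          have hem : e ∣ m := by
            have : smallestFactor n * e ∣ smallestFactor n * m := by
              rw [← he, ← hm]; exact hxn
            exact (mul_dvd_mul_iff_left (by omega : smallestFactor n ≠ 0)).mp this
          exact ⟨e, (IH e).mpr ⟨he1, hem⟩, he.symm⟩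
        · left
          exact (IH x).mpr ⟨hx1, key_coprime n (smallestFactor n) m x hn2 hp2 hmin hm hx1 hxn hpx⟩

theorem divisorsRec_nodup (fuel : Nat) (n : Int) : (divisorsRec fuel n).Nodup := by
  induction fuel generalizing n with
  | zero => simp [divisorsRec]
  | succ fuel ih =>
    by_cases hone : n = 1
    · simp [divisorsRec, hone]
    · simp only [divisorsRec, if_neg hone]
      exact PySem.Set.nodup_union _ _ (ih _)

-- A-side: the collected entries together with A are exactly the divisors ≥ 2 of A
theorem mem_SLA (A x : Int) (hA : 2 ≤ A) :
    (x ∈ smallsL A (PySem.List.pyRange 2 (Int.sqrt A + 1) 1) ∨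
      x ∈ largesL A (PySem.List.pyRange 2 (Int.sqrt A + 1) 1) ∨ x = A) ↔
    (2 ≤ x ∧ x ∣ A) := by
  have hA0 : (0:Int) ≤ A := by omega
  constructor
  · rintro (hx | hx | rfl)
    · obtain ⟨h2, hsq, _⟩ := smallsL_mem_facts A x hA0 hx
      have hm : x ∈ smallsL A (PySem.List.pyRange 2 (Int.sqrt A + 1) 1) := hx
      unfold smallsL at hm
      rw [List.mem_filter] at hm
      exact ⟨h2, (PySem.Int.mod_eq_zero_iff_dvd A x).mp (by simpa using hm.2)⟩
    · obtain ⟨j, hj2, hjj, heq⟩ := largesL_mem_facts A x hA0 hx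
      exact ⟨by nlinarith, ⟨j, heq.symm⟩⟩
    · exact ⟨hA, dvd_refl _⟩
  · rintro ⟨h2, hdvd⟩
    have hq : A / x * x = A := Int.ediv_mul_cancel hdvd
    have hxA : x ≤ A := Int.le_of_dvd (by omega) hdvd
    by_cases hsq : x * x ≤ A
    · left
      unfold smallsL
      rw [List.mem_filter, PySem.List.mem_pyRange_one]
      refine ⟨⟨h2, by have := (sq_le_iff_le_sqrt A x hA0 (by omega)).mp hsq; omega⟩, ?_⟩
      simpa using (PySem.Int.mod_eq_zero_iff_dvd A x).mpr hdvd
    · push_neg at hsq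
      rcases eq_or_lt_of_le hxA with rfl | hlt
      · right; right; rfl
      · right; left
        set q : Int := A / x with hqdef
        have hq2 : 2 ≤ q := by nlinarith
        have hqlt : q < x := by nlinarith
        have hqq : q * q < A := by nlinarith
        have hfq : PySem.Int.floordiv A q = x := by
          rw [PySem.Int.floordiv_eq_ediv_of_pos (by omega)]
          have : q * x = A := by linarith [hq]
          calc A / q = q * x / q := by rw [this]
            _ = x := Int.mul_ediv_cancel_left x (by omega)
        unfold largesL
        rw [List.mem_map]
        refine ⟨q, ?_, hfq⟩
        rw [List.mem_filter]
        constructor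
        · unfold smallsL
          rw [List.mem_filter, PySem.List.mem_pyRange_one]
          refine ⟨⟨hq2, ?_⟩, ?_⟩
          · have := (sq_le_iff_le_sqrt A q hA0 (by omega)).mp (le_of_lt hqq); omega
          · simpa using (PySem.Int.mod_eq_zero_iff_dvd A q).mpr ⟨x, by linarith [hq]⟩
        · simp only [decide_eq_true_eq, ne_eq]
          rw [hfq]; omega

-- ===== VERDICT (by name: the statement is the Claim_ definition above) =====
theorem yakusu_spec : Claim_unchanged_yakusu := by
  intro A _hDom hPre hnD
  have hA2 : (2:Int) ≤ A := by
    have : A ≠ 1 := hnD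
    have h1 : (1:Int) ≤ A := hPre
    omega
  have hA : (0:Int) ≤ A := by omega
  unfold yakusu yakusu_alt
  simp only []
  rw [a_arr_eq A]
  set S := smallsL A (PySem.List.pyRange 2 (Int.sqrt A + 1) 1) with hS
  set Lg := largesL A (PySem.List.pyRange 2 (Int.sqrt A + 1) 1) with hL
  set F := (divisorsRec (A.toNat + 1) A).filter (fun d => decide (1 < d)) with hF
  have hap := a_pairwise A hA
  -- A's sorted output is the strictly increasing list S ++ (Lg.reverse ++ [A])
  have hAeq : PySem.List.sorted
      ((PySem.List.pyRange 2 (Int.sqrt A + 1) 1).flatMap (fun i =>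
        if PySem.Int.mod A i == 0 then
          i :: (if i ≠ PySem.Int.floordiv A i then [PySem.Int.floordiv A i] else [])
        else []) ++ [A]) (fun x => x) false = S ++ (Lg.reverse ++ [A]) := by
    apply PySem.List.sorted_eq_of_perm_of_pairwise_lt
    · refine List.Perm.trans ?_ (List.Perm.append_right [A] (flatMap_perm A _)).symm
      simp only [List.append_assoc]
      exact List.Perm.append_left S (List.Perm.append_right [A] (List.reverse_perm Lg))
    · exact hap
  -- B's sorted output is the same list
  have hFmem : ∀ x, x ∈ F ↔ (2 ≤ x ∧ x ∣ A) := by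
    intro x
    rw [hF, List.mem_filter]
    rw [divisorsRec_mem (A.toNat + 1) A (by omega) (by omega) x]
    constructor
    · rintro ⟨⟨h1, h2⟩, h3⟩
      simp only [decide_eq_true_eq] at h3
      exact ⟨by omega, h2⟩
    · rintro ⟨h1, h2⟩
      exact ⟨⟨by omega, h2⟩, by simp; omega⟩
  have hBeq : PySem.List.sorted F (fun x => x) false = S ++ (Lg.reverse ++ [A]) := by
    apply PySem.List.sorted_eq_of_perm_of_pairwise_lt
    · have hnd1 : (S ++ (Lg.reverse ++ [A])).Nodup := hap.nodup
      have hnd2 : F.Nodup := (divisorsRec_nodup _ _).filter _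
      refine (List.perm_ext_iff_of_nodup hnd1 hnd2).mpr ?_
      intro a
      rw [hFmem a, ← mem_SLA A a hA2]
      simp [hS, hL, or_assoc]
    · exact hap
  rw [hAeq, hBeq]

theorem yakusu_changed : Claim_changed_yakusu := by
  unfold Claim_changed_yakusu; decide

theorem yakusu_tight : Claim_exact_yakusu := by
  intro A _hDom _hPre hD
  have h1 : A = 1 := hD
  subst h1
  decide
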